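-- pv_equiv track=rewrite | github.com/ghrbs0437/SolvePS | 프로그래머스/1/468370. 중요한 단어를 스포 방지/중요한 단어를 스포 방지.py | solution
-- ===== SOURCE A (Python) =====
-- from collections import Counter
--
-- def solution(message, spoiler_ranges):
--     answer = 0
--     normal_string = set([])
--     spo_string = []
--
--     mask = [False]* len(message)
--
--     for spoiler_range in spoiler_ranges:
--         for i in range(spoiler_range[0], spoiler_range[1]+1):
--             mask[i] = True
--
--     build_str = ""
--     flag = False
--
--     for i in range(len(message)):
--         if message[i] == ' ':
--             if flag :
--                 spo_string.append(build_str)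
--             else :
--                 normal_string.add(build_str)
--             build_str = ""
--             flag = False
--         else:
--             build_str += message[i]
--             if mask[i]:
--                 flag = True
--
--
--     if flag :
--         spo_string.append(build_str)
--     else :
--         normal_string.add(build_str)
--
--
--     count = Counter(spo_string)
--
--     for key in count:
--         if count[key] >= 1 and key not in normal_string:
--             answer+=1
--
--     return answer
-- ===== SOURCE B (Python) =====
-- def solution(message, spoiler_ranges):
--     n = len(message)
--     diff = [0] * (n + 1)
--     for s, e in spoiler_ranges:
--         if s <= e:
--             diff[s] += 1
--             diff[e + 1] -= 1
--     normal = set()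
--     spo = set()
--     word = ""
--     acc = 0
--     hit = False
--     for i, ch in enumerate(message):
--         acc += diff[i]
--         if ch == ' ':
--             if hit:
--                 spo.add(word)
--             else:
--                 normal.add(word)
--             word = ""
--             hit = False
--         else:
--             word += ch
--             if acc > 0:
--                 hit = True
--     if hit:
--         spo.add(word)
--     else:
--         normal.add(word)
--     return len(spo - normal)
-- ===== Notes on version B (the rewrite author's own statement) =====
-- stated objective: alternative
-- what changed: B replaces A's per-index marking of every spoiler range by a difference array whose running prefix sum is swept once fused with the word scan, and replaces A's Counter-plus-membership counting loop by a direct set difference; it trades A's O(sum of range lengths) marking for O(R) range updates at the same overall scan cost.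
-- outside the precondition, e.g. on solution('ab cd', [(-2, -1)]): A returns 1, B returns 0
import Mathlib
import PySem

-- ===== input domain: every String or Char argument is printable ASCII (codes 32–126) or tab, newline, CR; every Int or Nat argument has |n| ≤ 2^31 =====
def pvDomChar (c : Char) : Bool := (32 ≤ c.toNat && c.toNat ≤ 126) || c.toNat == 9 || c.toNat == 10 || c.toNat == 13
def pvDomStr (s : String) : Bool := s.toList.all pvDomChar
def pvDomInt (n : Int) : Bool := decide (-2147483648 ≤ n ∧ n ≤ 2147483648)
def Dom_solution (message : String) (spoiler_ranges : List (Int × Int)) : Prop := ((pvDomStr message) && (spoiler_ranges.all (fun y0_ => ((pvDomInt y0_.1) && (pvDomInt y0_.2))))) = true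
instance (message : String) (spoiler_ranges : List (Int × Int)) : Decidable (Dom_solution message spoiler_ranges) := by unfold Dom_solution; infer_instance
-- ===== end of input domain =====

-- B replaces A's per-index marking of every spoiler range by a difference array swept once
-- (fused with the word scan) and counts spoiler-only words by a set difference (alternative algorithm).

-- ===== PORT A =====
-- for i in range(spoiler_range[0], spoiler_range[1]+1): mask[i] = True
def aMarkRange (m : List Bool) (r : Int × Int) : List Bool :=
  (PySem.List.pyRange r.1 (r.2 + 1)).foldl (fun m i => PySem.List.pySetD m i true) m

def aMask (n : Nat) (rs : List (Int × Int)) : List Bool :=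
  rs.foldl aMarkRange (List.replicate n false)

-- loop state: (build_str, flag, normal_string, spo_string)
def aStep (chars : List Char) (mask : List Bool) :
    List Char × Bool × PySem.Set (List Char) × List (List Char) → Int →
    List Char × Bool × PySem.Set (List Char) × List (List Char)
  | (build, flag, normal, spo), i =>
    let c := PySem.List.pyGetD chars i ' '
    if c == ' ' then
      if flag then ([], false, normal, spo ++ [build])
      else ([], false, PySem.Set.add normal build, spo)
    else
      (build ++ [c], if PySem.List.pyGetD mask i false then true else flag, normal, spo)

def solution (message : String) (spoiler_ranges : List (Int × Int)) : Int :=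
  let chars := message.toList
  let n := chars.length
  let mask := aMask n spoiler_ranges
  let st := (PySem.List.pyRange 0 (n : Int)).foldl (aStep chars mask)
      ([], false, PySem.Set.empty, [])
  let spo := if st.2.1 then st.2.2.2 ++ [st.1] else st.2.2.2
  let normal := if st.2.1 then st.2.2.1 else PySem.Set.add st.2.2.1 st.1
  let count := PySem.Dict.counter spo
  count.keys.foldl
    (fun answer key =>
      if 1 ≤ count.getD key 0 ∧ ¬ normal.contains key = true then answer + 1 else answer) 0

-- ===== PORT B =====
-- if s <= e: diff[s] += 1; diff[e+1] -= 1
def bAddRange (d : List Int) (r : Int × Int) : List Int :=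
  if r.1 ≤ r.2 then
    let d1 := PySem.List.pySetD d r.1 (PySem.List.pyGetD d r.1 0 + 1)
    PySem.List.pySetD d1 (r.2 + 1) (PySem.List.pyGetD d1 (r.2 + 1) 0 - 1)
  else d

def bDiff (n : Nat) (rs : List (Int × Int)) : List Int :=
  rs.foldl bAddRange (List.replicate (n + 1) 0)

-- loop state: (word, acc, hit, normal, spo)
def bStep (diff : List Int) :
    List Char × Int × Bool × PySem.Set (List Char) × PySem.Set (List Char) → Int × Char →
    List Char × Int × Bool × PySem.Set (List Char) × PySem.Set (List Char)
  | (word, acc, hit, normal, spo), (i, ch) =>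
    let acc := acc + PySem.List.pyGetD diff i 0
    if ch == ' ' then
      if hit then ([], acc, false, normal, PySem.Set.add spo word)
      else ([], acc, false, PySem.Set.add normal word, spo)
    else
      (word ++ [ch], acc, if 0 < acc then true else hit, normal, spo)

def solution_alt (message : String) (spoiler_ranges : List (Int × Int)) : Int :=
  let chars := message.toList
  let n := chars.length
  let diff := bDiff n spoiler_ranges
  let st := (PySem.List.enumerate chars).foldl (bStep diff)
      ([], 0, false, PySem.Set.empty, PySem.Set.empty)
  let spo := if st.2.2.1 then PySem.Set.add st.2.2.2.2 st.1 else st.2.2.2.2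
  let normal := if st.2.2.1 then st.2.2.2.1 else PySem.Set.add st.2.2.2.1 st.1
  ((PySem.Set.diff spo normal).length : Int)

-- ===== PRECONDITION & SPEC =====
-- Pre_ excludes nonempty ranges that reach outside [0, len(message)): there A either raises
-- IndexError or silently wraps negative indices (a Python list-indexing artefact), B's difference
-- array wraps differently, and neither corner value is specified by the task.
def Pre_solution (message : String) (spoiler_ranges : List (Int × Int)) : Prop :=
  ∀ r ∈ spoiler_ranges, r.1 ≤ r.2 → 0 ≤ r.1 ∧ r.2 < (message.toList.length : Int)

instance (message : String) (spoiler_ranges : List (Int × Int)) : Decidable (Pre_solution message spoiler_ranges) := by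
  unfold Pre_solution; infer_instance

def pvWitness_solution : String × (List (Int × Int)) := ("ab cd x", [((3 : Int), (4 : Int)), ((2 : Int), (0 : Int))])

def Spec_solution (message : String) (spoiler_ranges : List (Int × Int)) (out : Int) : Prop := out = solution_alt message spoiler_ranges
instance (message : String) (spoiler_ranges : List (Int × Int)) (out : Int) : Decidable (Spec_solution message spoiler_ranges out) := by unfold Spec_solution; infer_instance

-- ===== CLAIM (what is proved, stated in full; the proofs are below) =====
def Claim_equal_solution : Prop := ∀ (message : String) (spoiler_ranges : List (Int × Int)), Dom_solution message spoiler_ranges → Pre_solution message spoiler_ranges → Spec_solution message spoiler_ranges (solution message spoiler_ranges)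

-- ===== LEMMAS AND PROOFS =====

-- prefix sum of the first m entries of the difference array
def presum (d : List Int) (m : Nat) : Int := (d.take m).sum

-- sum of a pointwise bump
lemma sum_set_add (l : List Int) : ∀ (k : Nat) (h : k < l.length) (δ : Int),
    (l.set k (l[k] + δ)).sum = l.sum + δ := by
  induction l with
  | nil => intro k h δ; simp at h
  | cons x t ih =>
    intro k h δ
    cases k with
    | zero => simp [List.set]; ring
    | succ k =>
      simp only [List.set, List.getElem_cons_succ, List.sum_cons]
      rw [ih k (by simpa using h) δ]; ring

lemma presum_set_add (l : List Int) (k : Nat) (hk : k < l.length) (δ : Int) (m : Nat) :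
    presum (l.set k (l[k] + δ)) m = presum l m + if k < m then δ else 0 := by
  unfold presum
  rw [List.take_set]
  by_cases h : k < m
  · have hk' : k < (l.take m).length := by simp; omega
    have : (l.take m)[k]'hk' = l[k] := by simp
    rw [← this, sum_set_add (l.take m) k hk' δ]
    simp [h]
  · have : (l.take m).length ≤ k := by simp; omega
    rw [List.set_eq_of_length_le this]
    simp [h]

lemma presum_succ (l : List Int) (k : Nat) (h : k < l.length) :
    presum l (k + 1) = presum l k + l[k] := by
  unfold presum; rw [List.sum_take_succ]

lemma length_bAddRange (d : List Int) (r : Int × Int) : (bAddRange d r).length = d.length := by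
  unfold bAddRange
  split <;> simp [PySem.List.length_pySetD]

lemma presum_bAddRange (d : List Int) (r : Int × Int)
    (hr : r.1 ≤ r.2 → 0 ≤ r.1 ∧ r.2 + 1 < (d.length : Int)) (i : Nat) :
    presum (bAddRange d r) (i + 1) =
      presum d (i + 1) + (if r.1 ≤ (i : Int) ∧ (i : Int) ≤ r.2 then 1 else 0) := by
  unfold bAddRange
  by_cases hle : r.1 ≤ r.2
  · obtain ⟨h1, h2⟩ := hr hle
    have k1 : r.1.toNat < d.length := by omega
    have e1 : PySem.List.pySetD d r.1 (PySem.List.pyGetD d r.1 0 + 1)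
        = d.set r.1.toNat (d[r.1.toNat]'k1 + 1) := by
      rw [PySem.List.pySetD_of_nonneg d _ h1,
        PySem.List.pyGetD_eq_getElem d 0 h1 (by omega)]
    set d1 := d.set r.1.toNat (d[r.1.toNat]'k1 + 1) with hd1
    have hd1len : d1.length = d.length := by simp [hd1]
    have k2 : (r.2 + 1).toNat < d1.length := by omega
    have e2 : PySem.List.pySetD d1 (r.2 + 1) (PySem.List.pyGetD d1 (r.2 + 1) 0 - 1)
        = d1.set (r.2 + 1).toNat (d1[(r.2 + 1).toNat]'k2 + (-1)) := by
      rw [PySem.List.pySetD_of_nonneg d1 _ (by omega),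
        PySem.List.pyGetD_eq_getElem d1 0 (by omega) (by omega)]
      ring_nf
    simp only [if_pos hle, e1, e2]
    rw [presum_set_add d1 _ k2 (-1) (i + 1), hd1,
      presum_set_add d _ k1 1 (i + 1)]
    have t1 : (r.1.toNat : Int) = r.1 := by omega
    have t2 : ((r.2 + 1).toNat : Int) = r.2 + 1 := by omega
    split_ifs <;> omega
  · simp only [if_neg hle]
    have : ¬ (r.1 ≤ (i : Int) ∧ (i : Int) ≤ r.2) := by omega
    simp [this]

lemma bFold_length (rs : List (Int × Int)) : ∀ (d : List Int),
    (rs.foldl bAddRange d).length = d.length := by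
  induction rs with
  | nil => intro d; rfl
  | cons r t ih => intro d; simp only [List.foldl_cons]; rw [ih, length_bAddRange]

lemma presum_bFold (rs : List (Int × Int)) : ∀ (d : List Int)
    (hpre : ∀ r ∈ rs, r.1 ≤ r.2 → 0 ≤ r.1 ∧ r.2 + 1 < (d.length : Int)) (i : Nat),
    presum (rs.foldl bAddRange d) (i + 1) =
      presum d (i + 1) + (rs.countP (fun r => decide (r.1 ≤ (i : Int) ∧ (i : Int) ≤ r.2)) : Int) := by
  induction rs with
  | nil => intro d _ i; simp
  | cons r t ih =>
    intro d hpre i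
    simp only [List.foldl_cons]
    rw [ih (bAddRange d r)
        (by intro q hq hle; have := hpre q (by simp [hq]) hle
            rwa [length_bAddRange]) i,
      presum_bAddRange d r (hpre r (by simp)) i]
    rw [List.countP_cons]
    simp only [decide_eq_true_eq]
    split_ifs <;> push_cast <;> ring

lemma length_bDiff (n : Nat) (rs : List (Int × Int)) : (bDiff n rs).length = n + 1 := by
  unfold bDiff; rw [bFold_length]; simp

lemma presum_bDiff (n : Nat) (rs : List (Int × Int))
    (hpre : ∀ r ∈ rs, r.1 ≤ r.2 → 0 ≤ r.1 ∧ r.2 < (n : Int)) (i : Nat) (hi : i < n) :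
    presum (bDiff n rs) (i + 1) =
      (rs.countP (fun r => decide (r.1 ≤ (i : Int) ∧ (i : Int) ≤ r.2)) : Int) := by
  unfold bDiff
  rw [presum_bFold rs (List.replicate (n + 1) 0)
    (by intro r hr hle; have := hpre r hr hle; simp; omega) i]
  simp [presum, List.take_replicate]

-- marking a contiguous range of indices
lemma pyRange_nil (a b : Int) (h : b ≤ a) : PySem.List.pyRange a b = [] := by
  simp [PySem.List.pyRange]; omega

lemma mark_getD : ∀ (fuel : Nat) (a b : Int), (b - a).toNat = fuel →
    ∀ (m : List Bool), 0 ≤ a → b ≤ (m.length : Int) → ∀ (i : Nat), i < m.length →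
    PySem.List.pyGetD ((PySem.List.pyRange a b).foldl (fun m j => PySem.List.pySetD m j true) m) (i : Int) false
      = (decide (a ≤ (i : Int) ∧ (i : Int) < b) || PySem.List.pyGetD m (i : Int) false) := by
  intro fuel
  induction fuel with
  | zero =>
    intro a b hf m ha hb i hi
    rw [pyRange_nil a b (by omega)]
    simp only [List.foldl_nil]
    have : ¬ (a ≤ (i : Int) ∧ (i : Int) < b) := by omega
    simp [this]
  | succ fuel ih =>
    intro a b hf m ha hb i hi
    have hab : a < b := by omega
    rw [PySem.List.pyRange_one_cons hab]
    simp only [List.foldl_cons]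
    have ha' : ((a.toNat : Nat) : Int) = a := Int.toNat_of_nonneg ha
    have haL : a.toNat < m.length := by omega
    have hlen : (PySem.List.pySetD m a true).length = m.length := PySem.List.length_pySetD m a true
    rw [ih (a + 1) b (by omega) (PySem.List.pySetD m a true) (by omega) (by omega) i (by omega)]
    rw [← ha', PySem.List.pyGetD_pySetD_natCast m a.toNat i true false haL]
    by_cases hia : i = a.toNat
    · have h1 : ((a.toNat : Nat) : Int) ≤ (i : Int) ∧ (i : Int) < b := by
        constructor <;> omega
      simp only [if_pos hia, Bool.or_true, decide_eq_true h1, Bool.true_or]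
    · have h2 : (((a.toNat : Nat) : Int) + 1 ≤ (i : Int) ∧ (i : Int) < b)
          ↔ (((a.toNat : Nat) : Int) ≤ (i : Int) ∧ (i : Int) < b) := by omega
      simp only [if_neg hia]
      rw [decide_eq_decide.mpr h2]

lemma length_markFold (a b : Int) (m : List Bool) :
    ((PySem.List.pyRange a b).foldl (fun m j => PySem.List.pySetD m j true) m).length = m.length := by
  induction (PySem.List.pyRange a b) generalizing m with
  | nil => rfl
  | cons x t ih => simp only [List.foldl_cons]; rw [ih, PySem.List.length_pySetD]

lemma aMarkRange_getD (m : List Bool) (r : Int × Int)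
    (hr : r.1 ≤ r.2 → 0 ≤ r.1 ∧ r.2 < (m.length : Int)) (i : Nat) (hi : i < m.length) :
    PySem.List.pyGetD (aMarkRange m r) (i : Int) false
      = (decide (r.1 ≤ (i : Int) ∧ (i : Int) ≤ r.2) || PySem.List.pyGetD m (i : Int) false) := by
  unfold aMarkRange
  by_cases hle : r.1 ≤ r.2
  · obtain ⟨h1, h2⟩ := hr hle
    rw [mark_getD (r.2 + 1 - r.1).toNat r.1 (r.2 + 1) rfl m h1 (by omega) i hi]
    have h3 : (r.1 ≤ (i : Int) ∧ (i : Int) < r.2 + 1) ↔ (r.1 ≤ (i : Int) ∧ (i : Int) ≤ r.2) := by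
      omega
    rw [decide_eq_decide.mpr h3]
  · rw [pyRange_nil _ _ (by omega)]
    have : ¬ (r.1 ≤ (i : Int) ∧ (i : Int) ≤ r.2) := by omega
    simp [this]

lemma aMaskFold (rs : List (Int × Int)) : ∀ (m : List Bool)
    (hpre : ∀ r ∈ rs, r.1 ≤ r.2 → 0 ≤ r.1 ∧ r.2 < (m.length : Int)) (i : Nat) (hi : i < m.length),
    PySem.List.pyGetD (rs.foldl aMarkRange m) (i : Int) false
      = (rs.any (fun r => decide (r.1 ≤ (i : Int) ∧ (i : Int) ≤ r.2))
          || PySem.List.pyGetD m (i : Int) false) := by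
  induction rs with
  | nil => intro m _ i hi; simp
  | cons r t ih =>
    intro m hpre i hi
    have hlen : (aMarkRange m r).length = m.length := by
      unfold aMarkRange; exact length_markFold _ _ _
    simp only [List.foldl_cons]
    rw [ih (aMarkRange m r)
        (by intro q hq hle; have := hpre q (by simp [hq]) hle; rwa [hlen]) i (by omega),
      aMarkRange_getD m r (hpre r (by simp)) i hi]
    simp only [List.any_cons]
    cases (decide (r.1 ≤ (i : Int) ∧ (i : Int) ≤ r.2)) <;>
      cases (t.any (fun r => decide (r.1 ≤ (i : Int) ∧ (i : Int) ≤ r.2))) <;> simp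

lemma aMask_getD (n : Nat) (rs : List (Int × Int))
    (hpre : ∀ r ∈ rs, r.1 ≤ r.2 → 0 ≤ r.1 ∧ r.2 < (n : Int)) (i : Nat) (hi : i < n) :
    PySem.List.pyGetD (aMask n rs) (i : Int) false
      = rs.any (fun r => decide (r.1 ≤ (i : Int) ∧ (i : Int) ≤ r.2)) := by
  unfold aMask
  rw [aMaskFold rs (List.replicate n false) (by simpa using hpre) i (by simpa using hi)]
  have : PySem.List.pyGetD (List.replicate n false) (i : Int) false = false := by
    rw [PySem.List.pyGetD_eq_getElem _ false (by omega) (by simp; omega)]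
    simp
  rw [this, Bool.or_false]

-- B's enumerate-fold as an index-fold (same shape as A's loop)
def bStep' (diff : List Int) (chars : List Char)
    (s : List Char × Int × Bool × PySem.Set (List Char) × PySem.Set (List Char)) (j : Int) :
    List Char × Int × Bool × PySem.Set (List Char) × PySem.Set (List Char) :=
  bStep diff s (j, PySem.List.pyGetD chars j ' ')

lemma bFold_eq (diff : List Int) (chars : List Char) init :
    (PySem.List.enumerate chars).foldl (bStep diff) init
      = (PySem.List.pyRange 0 (chars.length : Int)).foldl (bStep' diff chars) init := by
  rw [PySem.List.enumerate_eq_map_pyRange chars ' ', List.foldl_map]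
  rfl

-- relation between A's and B's scan states
def ScanRel (sa : List Char × Bool × PySem.Set (List Char) × List (List Char))
    (sb : List Char × Int × Bool × PySem.Set (List Char) × PySem.Set (List Char)) : Prop :=
  sa.1 = sb.1 ∧ sa.2.1 = sb.2.2.1 ∧ sa.2.2.1 = sb.2.2.2.1 ∧
    sb.2.2.2.2 = PySem.Set.ofList sa.2.2.2

lemma ofList_snoc (l : List (List Char)) (x : List Char) :
    PySem.Set.ofList (l ++ [x]) = PySem.Set.add (PySem.Set.ofList l) x := by
  rw [PySem.Set.ofList_eq_foldl, PySem.Set.ofList_eq_foldl, List.foldl_append]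
  rfl

-- the two scans agree step by step
lemma loopAlign (chars : List Char) (mask : List Bool) (diff : List Int)
    (hlen : chars.length < diff.length)
    (hmd : ∀ i : Nat, i < chars.length →
      PySem.List.pyGetD mask (i : Int) false = decide (0 < presum diff (i + 1))) :
    ∀ (fuel k : Nat), chars.length - k = fuel → k ≤ chars.length →
    ∀ (build : List Char) (flag : Bool) (normal : PySem.Set (List Char))
      (spoList : List (List Char)),
    ScanRel ((PySem.List.pyRange (k : Int) (chars.length : Int)).foldl (aStep chars mask)
        (build, flag, normal, spoList))
      ((PySem.List.pyRange (k : Int) (chars.length : Int)).foldl (bStep' diff chars)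
        (build, presum diff k, flag, normal, PySem.Set.ofList spoList)) := by
  intro fuel
  induction fuel with
  | zero =>
    intro k hf hk build flag normal spoList
    rw [pyRange_nil _ _ (by exact_mod_cast Nat.cast_le.mpr (by omega))]
    exact ⟨rfl, rfl, rfl, rfl⟩
  | succ fuel ih =>
    intro k hf hk build flag normal spoList
    have hkn : k < chars.length := by omega
    rw [PySem.List.pyRange_one_cons (by exact_mod_cast Nat.cast_lt.mpr hkn)]
    simp only [List.foldl_cons]
    have hacc : presum diff k + PySem.List.pyGetD diff (k : Int) 0 = presum diff (k + 1) := by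
      rw [PySem.List.pyGetD_eq_getElem diff 0 (by omega) (by exact_mod_cast (by omega : k < diff.length))]
      rw [presum_succ diff k (by omega)]
      simp
    show ScanRel ((PySem.List.pyRange ((k : Int) + 1) (chars.length : Int)).foldl (aStep chars mask)
        (aStep chars mask (build, flag, normal, spoList) (k : Int)))
      ((PySem.List.pyRange ((k : Int) + 1) (chars.length : Int)).foldl (bStep' diff chars)
        (bStep' diff chars (build, presum diff k, flag, normal, PySem.Set.ofList spoList) (k : Int)))
    have hcast : ((k : Int) + 1) = (((k + 1 : Nat) : Nat) : Int) := by push_cast; ring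
    rw [hcast]
    unfold bStep'
    simp only [aStep, bStep, hacc]
    by_cases hc : (PySem.List.pyGetD chars (k : Int) ' ' == ' ') = true
    · simp only [hc, if_true]
      cases flag with
      | true =>
        simp only [if_true]
        have := ih (k + 1) (by omega) (by omega) [] false normal (spoList ++ [build])
        rw [ofList_snoc] at this
        exact this
      | false =>
        simp only [Bool.false_eq_true, if_false]
        exact ih (k + 1) (by omega) (by omega) [] false (PySem.Set.add normal build) spoList
    · simp only [hc]
      have hflag : (if PySem.List.pyGetD mask (k : Int) false = true then true else flag)
          = (if 0 < presum diff (k + 1) then true else flag) := by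
        rw [hmd k hkn]
        by_cases hp : 0 < presum diff (k + 1) <;> simp [hp]
      rw [hflag]
      exact ih (k + 1) (by omega) (by omega) (build ++ [PySem.List.pyGetD chars (k : Int) ' '])
        (if 0 < presum diff (k + 1) then true else flag) normal spoList

-- A's counting loop over Counter(spo) is the size of the set difference
lemma count_eq (spo : List (List Char)) (normal : PySem.Set (List Char)) :
    ((PySem.Dict.counter spo).keys.foldl
      (fun answer key =>
        if 1 ≤ (PySem.Dict.counter spo).getD key 0 ∧ ¬ normal.contains key = true then answer + 1
        else answer) 0)
      = ((PySem.Set.diff (PySem.Set.ofList spo) normal).length : Int) := by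
  rw [PySem.Dict.keys_counter]
  have hcongr : ∀ (a : Int), ∀ k ∈ PySem.Set.ofList spo,
      (if 1 ≤ (PySem.Dict.counter spo).getD k 0 ∧ ¬ normal.contains k = true then a + 1 else a)
        = (if ¬ normal.contains k = true then a + 1 else a) := by
    intro a k hk
    rw [PySem.Dict.getD_counter]
    have hm : k ∈ spo := (PySem.Set.mem_ofList spo k).mp hk
    have h1 : (1 : Int) ≤ (List.count k spo : Int) := by
      exact_mod_cast List.count_pos_iff.mpr hm
    simp [h1]
  rw [PySem.List.foldl_congr_mem _ _ _ _ hcongr,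
    PySem.List.foldl_ite_add_one (fun k => ¬ normal.contains k = true)]
  unfold PySem.Set.diff
  rw [← List.countP_eq_length_filter]
  simp

-- Bool bridge: covered-by-some-range equals positive cover count
lemma any_eq_decide_countP (rs : List (Int × Int)) (i : Nat) :
    rs.any (fun r => decide (r.1 ≤ (i : Int) ∧ (i : Int) ≤ r.2))
      = decide (0 < (rs.countP (fun r => decide (r.1 ≤ (i : Int) ∧ (i : Int) ≤ r.2)) : Int)) := by
  cases hb : rs.any (fun r => decide (r.1 ≤ (i : Int) ∧ (i : Int) ≤ r.2)) with
  | true =>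
    rw [List.any_eq_true] at hb
    have : 0 < rs.countP (fun r => decide (r.1 ≤ (i : Int) ∧ (i : Int) ≤ r.2)) :=
      List.countP_pos_iff.mpr (by simpa using hb)
    symm; rw [decide_eq_true_eq]; exact_mod_cast this
  | false =>
    rw [List.any_eq_false] at hb
    have : rs.countP (fun r => decide (r.1 ≤ (i : Int) ∧ (i : Int) ≤ r.2)) = 0 :=
      List.countP_eq_zero.mpr (by simpa using hb)
    symm; rw [decide_eq_false_iff_not, this]
    simp

theorem solution_spec : Claim_equal_solution := by
  unfold Claim_equal_solution
  intro message rs _ hpre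
  unfold Spec_solution
  simp only [solution, solution_alt]
  rw [bFold_eq]
  set chars := message.toList with hchars
  set n := chars.length with hn
  have hpre' : ∀ r ∈ rs, r.1 ≤ r.2 → 0 ≤ r.1 ∧ r.2 < (n : Int) := hpre
  have hlen : n < (bDiff n rs).length := by rw [length_bDiff]; omega
  have hmd : ∀ i : Nat, i < n →
      PySem.List.pyGetD (aMask n rs) (i : Int) false
        = decide (0 < presum (bDiff n rs) (i + 1)) := by
    intro i hi
    rw [aMask_getD n rs hpre' i hi, presum_bDiff n rs hpre' i hi]
    exact any_eq_decide_countP rs i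
  have hrel := loopAlign chars (aMask n rs) (bDiff n rs) hlen hmd n 0 (by omega) (by omega)
    [] false PySem.Set.empty []
  have h0 : presum (bDiff n rs) 0 = 0 := by simp [presum]
  rw [h0] at hrel
  rw [show ((0 : Nat) : Int) = (0 : Int) by simp] at hrel
  rw [show PySem.Set.ofList ([] : List (List Char)) = PySem.Set.empty from rfl] at hrel
  set sa := (PySem.List.pyRange 0 (n : Int)).foldl (aStep chars (aMask n rs))
      ([], false, PySem.Set.empty, []) with hsa
  set sb := (PySem.List.pyRange 0 (n : Int)).foldl (bStep' (bDiff n rs) chars)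
      ([], 0, false, PySem.Set.empty, PySem.Set.empty) with hsb
  obtain ⟨e1, e2, e3, e4⟩ := hrel
  have hspo : (if sb.2.2.1 then PySem.Set.add sb.2.2.2.2 sb.1 else sb.2.2.2.2)
      = PySem.Set.ofList (if sa.2.1 then sa.2.2.2 ++ [sa.1] else sa.2.2.2) := by
    rw [← e2, ← e1, e4]
    cases sa.2.1 <;> simp [ofList_snoc]
  have hnormal : (if sb.2.2.1 then sb.2.2.2.1 else PySem.Set.add sb.2.2.2.1 sb.1)
      = (if sa.2.1 then sa.2.2.1 else PySem.Set.add sa.2.2.1 sa.1) := by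
    rw [← e2, ← e1, e3]
  rw [hspo, hnormal]
  exact count_eq _ _
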